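-- pv_equiv track=rewrite | github.com/RobbertDHuisman/AdventOfCode2024 | day_20/part_2.py | find_all_shortcuts
-- ===== SOURCE A (Python) =====
-- def find_all_shortcuts(track):
--     shortcuts = []
--     for i in range(0, len(track) - 1):
--         for j in range(i+1, len(track)):
--             if abs(track[i][0] - track[j][0]) + abs(track[i][1] - track[j][1]) <= 20 and \
--                 abs(track[i][0] - track[j][0]) + abs(track[i][1] - track[j][1]) > 1:
--
--                 if track[i][0] == track[j][0]:
--                     one_line = 1
--                     for k in range(track[i][1], track[j][1]):
--                         point_on_line_found = 0
--                         for m in range(i, j):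
--                             if track[m] == [track[i][0], k]:
--                                 point_on_line_found = 1
--                         if point_on_line_found == 0:
--                             one_line = 0
--                             break
--
--                 elif track[i][1] == track[j][1]:
--                     one_line = 1
--                     for k in range(track[i][0], track[j][0]):
--                         point_on_line_found = 0
--                         for m in range(i, j):
--                             if track[m] == [k, track[i][1]]:
--                                 point_on_line_found = 1
--                         if point_on_line_found == 0:
--                             one_line = 0
--                             break
--
--                 else:
--                     one_line = 0
--
--                 if one_line != 1:
--                     shortcuts.append([track[i], track[j]])
--
--     return shortcuts
-- ===== SOURCE B (Python) =====
-- def find_all_shortcuts(track):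
--     n = len(track)
--     shortcuts = []
--     for i in range(n - 1):
--         xi, yi = track[i][0], track[i][1]
--         # One forward sweep per i: as j grows, points of track[i:j] that lie on the
--         # column x=xi (resp. row y=yi) are absorbed into coverage sets, and two
--         # monotone reach pointers rc, rr keep the invariant
--         #   every k in [yi, rc) has [xi, k] in track[i:j]  and  rc is not covered,
--         #   every k in [xi, rr) has [k, yi] in track[i:j]  and  rr is not covered,
--         # so "the straight segment from point i to point j is fully on the track
--         # between indices i and j" collapses to a single pointer comparison.
--         col_cov, row_cov = set(), set()
--         rc, rr = yi, xi
--
--         def absorb(row):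
--             nonlocal rc, rr
--             if len(row) == 2:
--                 if row[0] == xi:
--                     col_cov.add(row[1])
--                     while rc in col_cov:
--                         rc += 1
--                 if row[1] == yi:
--                     row_cov.add(row[0])
--                     while rr in row_cov:
--                         rr += 1
--
--         absorb(track[i])
--         for j in range(i + 1, n):
--             xj, yj = track[j][0], track[j][1]
--             d = abs(xi - xj) + abs(yi - yj)
--             if 1 < d <= 20:
--                 if xi == xj:
--                     straight = yj <= rc
--                 elif yi == yj:
--                     straight = xj <= rr
--                 else:
--                     straight = False
--                 if not straight:
--                     shortcuts.append([track[i], track[j]])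
--             absorb(track[j])
--     return shortcuts
-- ===== Notes on version B (the rewrite author's own statement) =====
-- stated objective: alternative
-- what changed: Per-pair straight-line verification (a k-loop over the segment, each sample rescanning track[i:j]) is replaced by a single forward sweep per i that absorbs each passed point once into column/row coverage sets and advances two monotone reach pointers (two-pointer technique), so each pair's straightness test becomes one comparison against a pointer.
import Mathlib
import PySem

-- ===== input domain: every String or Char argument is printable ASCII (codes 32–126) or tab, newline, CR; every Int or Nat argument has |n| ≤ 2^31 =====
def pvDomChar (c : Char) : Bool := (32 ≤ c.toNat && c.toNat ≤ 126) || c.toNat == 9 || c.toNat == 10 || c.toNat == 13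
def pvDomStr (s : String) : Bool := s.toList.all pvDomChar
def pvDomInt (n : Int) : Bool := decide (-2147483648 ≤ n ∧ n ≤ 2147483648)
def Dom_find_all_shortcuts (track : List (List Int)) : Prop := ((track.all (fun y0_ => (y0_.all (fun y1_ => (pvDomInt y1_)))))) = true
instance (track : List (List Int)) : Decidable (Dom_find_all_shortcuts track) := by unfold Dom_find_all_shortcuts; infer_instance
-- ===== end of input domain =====

-- B (alternative algorithm): instead of re-verifying the straight segment for every pair
-- with a per-sample rescan of track[i:j], B makes one forward sweep per i, absorbing each
-- passed point once into column/row coverage sets and advancing two monotone reach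
-- pointers, so each pair's straightness test is a single comparison.
-- track[m] and row[0]/row[1] accessors, shared by both ports (both Pythons write track[i][0] etc.):
def pvRow (track : List (List Int)) (i : Int) : List Int := PySem.List.pyGetD track i []
def pvCoord (r : List Int) (c : Int) : Int := PySem.List.pyGetD r c 0

-- ===== PORT A =====
-- inner 'for m in range(i, j): if track[m] == p: point_on_line_found = 1'
def pvMScanA (track : List (List Int)) (i j : Int) (p : List Int) : Int :=
  (PySem.List.pyRange i j 1).foldl (fun f m => if pvRow track m = p then 1 else f) 0

-- 'one_line = 1; for k in ks: … if point_on_line_found == 0: one_line = 0; break'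
-- (pt k is the probed point: [x, k] in the same-column branch, [k, y] in the same-row branch)
def pvKLoopA (track : List (List Int)) (i j : Int) (pt : Int → List Int) : List Int → Int
  | [] => 1
  | k :: ks => if pvMScanA track i j (pt k) = 0 then 0 else pvKLoopA track i j pt ks

-- body of A's j-loop
def pvBodyA (track : List (List Int)) (i : Int) (shortcuts : List (List (List Int))) (j : Int) :
    List (List (List Int)) :=
  if |pvCoord (pvRow track i) 0 - pvCoord (pvRow track j) 0| +
       |pvCoord (pvRow track i) 1 - pvCoord (pvRow track j) 1| ≤ 20 ∧
     |pvCoord (pvRow track i) 0 - pvCoord (pvRow track j) 0| +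
       |pvCoord (pvRow track i) 1 - pvCoord (pvRow track j) 1| > 1 then
    let one_line : Int :=
      if pvCoord (pvRow track i) 0 = pvCoord (pvRow track j) 0 then
        pvKLoopA track i j (fun k => [pvCoord (pvRow track i) 0, k])
          (PySem.List.pyRange (pvCoord (pvRow track i) 1) (pvCoord (pvRow track j) 1) 1)
      else if pvCoord (pvRow track i) 1 = pvCoord (pvRow track j) 1 then
        pvKLoopA track i j (fun k => [k, pvCoord (pvRow track i) 1])
          (PySem.List.pyRange (pvCoord (pvRow track i) 0) (pvCoord (pvRow track j) 0) 1)
      else 0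
    if one_line ≠ 1 then shortcuts ++ [[pvRow track i, pvRow track j]] else shortcuts
  else shortcuts

def find_all_shortcuts (track : List (List Int)) : List (List (List Int)) :=
  (PySem.List.pyRange 0 ((track.length : Int) - 1) 1).foldl
    (fun shortcuts i =>
      (PySem.List.pyRange (i + 1) (track.length : Int) 1).foldl (pvBodyA track i) shortcuts)
    []

-- ===== PORT B =====
-- 'while r in cov: r += 1' — fueled; fuel = |cov| + 1 always suffices (cov has no duplicates,
-- and each iteration's r is a fresh element of cov)
def pvAdvance : Nat → PySem.Set Int → Int → Int
  | 0, _, r => r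
  | fuel + 1, cov, r => if r ∈ cov then pvAdvance fuel cov (r + 1) else r

def pvWhileAdvance (cov : PySem.Set Int) (r : Int) : Int := pvAdvance (cov.length + 1) cov r

-- 'def absorb(row): if len(row) == 2: …' — state ((col_cov, rc), (row_cov, rr))
def pvAbsorb (xi yi : Int) (st : (PySem.Set Int × Int) × (PySem.Set Int × Int)) (row : List Int) :
    (PySem.Set Int × Int) × (PySem.Set Int × Int) :=
  if row.length = 2 then
    let cs := if pvCoord row 0 = xi then
        let c := PySem.Set.add st.1.1 (pvCoord row 1)
        (c, pvWhileAdvance c st.1.2)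
      else st.1
    let rs := if pvCoord row 1 = yi then
        let c := PySem.Set.add st.2.1 (pvCoord row 0)
        (c, pvWhileAdvance c st.2.2)
      else st.2
    (cs, rs)
  else st

-- body of B's j-loop: test the pair against the reach pointers, then absorb track[j]
def pvStepB (track : List (List Int)) (i xi yi : Int)
    (p : ((PySem.Set Int × Int) × (PySem.Set Int × Int)) × List (List (List Int))) (j : Int) :
    ((PySem.Set Int × Int) × (PySem.Set Int × Int)) × List (List (List Int)) :=
  let xj := pvCoord (pvRow track j) 0
  let yj := pvCoord (pvRow track j) 1
  let d := |xi - xj| + |yi - yj|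
  let acc :=
    if 1 < d ∧ d ≤ 20 then
      let straight : Bool :=
        if xi = xj then decide (yj ≤ p.1.1.2)
        else if yi = yj then decide (xj ≤ p.1.2.2)
        else false
      if straight then p.2 else p.2 ++ [[pvRow track i, pvRow track j]]
    else p.2
  (pvAbsorb xi yi p.1 (pvRow track j), acc)

def find_all_shortcuts_alt (track : List (List Int)) : List (List (List Int)) :=
  (PySem.List.pyRange 0 ((track.length : Int) - 1) 1).foldl
    (fun acc i =>
      let xi := pvCoord (pvRow track i) 0
      let yi := pvCoord (pvRow track i) 1
      let st0 := pvAbsorb xi yi ((PySem.Set.empty, yi), (PySem.Set.empty, xi)) (pvRow track i)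
      ((PySem.List.pyRange (i + 1) (track.length : Int) 1).foldl (pvStepB track i xi yi)
        (st0, acc)).2)
    []

-- ===== PRECONDITION & SPEC =====
-- Pre_ excludes exactly the inputs on which Python A raises IndexError: with at least two
-- rows, every row must have length ≥ 2 (track[i][0]/track[i][1] are read for every pair).
def Pre_find_all_shortcuts (track : List (List Int)) : Prop :=
  track.length ≤ 1 ∨ ∀ row ∈ track, 2 ≤ row.length
instance (track : List (List Int)) : Decidable (Pre_find_all_shortcuts track) := by
  unfold Pre_find_all_shortcuts; infer_instance

def pvWitness_find_all_shortcuts : List (List Int) := [[0, 0], [5, 5]]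

def Spec_find_all_shortcuts (track : List (List Int)) (out : List (List (List Int))) : Prop :=
  out = find_all_shortcuts_alt track
instance (track : List (List Int)) (out : List (List (List Int))) :
    Decidable (Spec_find_all_shortcuts track out) := by unfold Spec_find_all_shortcuts; infer_instance

-- ===== CLAIM (what is proved, stated in full; the proofs are below) =====
def Claim_equal_find_all_shortcuts : Prop :=
  ∀ (track : List (List Int)), Dom_find_all_shortcuts track → Pre_find_all_shortcuts track →
    Spec_find_all_shortcuts track (find_all_shortcuts track)

-- ===== LEMMAS AND PROOFS =====

-- a list equals the two-element list [a, b] iff it has length 2 and those entries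
theorem pvPair_eq_iff (row : List Int) (a b : Int) :
    row = [a, b] ↔ row.length = 2 ∧ pvCoord row 0 = a ∧ pvCoord row 1 = b := by
  rcases row with _ | ⟨p, _ | ⟨q, _ | ⟨s, t⟩⟩⟩ <;>
    simp [pvCoord, PySem.List.pyGetD]

-- the fueled while-loop: with fuel beyond the number of elements ≥ r, the result is the
-- first value from r upward not in cov
theorem pvAdvance_spec (fuel : Nat) (cov : PySem.Set Int) :
    ∀ (r : Int), (cov.filter (fun t => decide (r ≤ t))).length < fuel →
      r ≤ pvAdvance fuel cov r ∧
      (∀ t, r ≤ t → t < pvAdvance fuel cov r → t ∈ cov) ∧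
      pvAdvance fuel cov r ∉ cov := by
  induction fuel with
  | zero => intro r h; omega
  | succ fuel ih =>
      intro r h
      by_cases hr : r ∈ cov
      · have hsub : List.Sublist (cov.filter (fun t => decide (r + 1 ≤ t)))
            (cov.filter (fun t => decide (r ≤ t))) := by
          apply List.monotone_filter_right
          intro t ht
          simp only [decide_eq_true_eq] at *
          omega
        have hlt : (cov.filter (fun t => decide (r + 1 ≤ t))).length <
            (cov.filter (fun t => decide (r ≤ t))).length := by
          rcases Nat.lt_or_ge (cov.filter (fun t => decide (r + 1 ≤ t))).length
              (cov.filter (fun t => decide (r ≤ t))).length with h' | h'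
          · exact h'
          · exfalso
            have := hsub.eq_of_length (le_antisymm hsub.length_le h')
            have hrmem : r ∈ cov.filter (fun t => decide (r ≤ t)) := by
              simp [List.mem_filter, hr]
            rw [← this] at hrmem
            simp [List.mem_filter] at hrmem
        have := ih (r + 1) (by omega)
        simp only [pvAdvance, if_pos hr]
        refine ⟨by omega, fun t ht1 ht2 => ?_, this.2.2⟩
        rcases eq_or_lt_of_le ht1 with rfl | ht1'
        · exact hr
        · exact this.2.1 t (by omega) ht2
      · simp only [pvAdvance, if_neg hr]
        exact ⟨le_refl r, fun t h1 h2 => absurd (lt_of_le_of_lt h1 h2) (lt_irrefl r), hr⟩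

theorem pvWhileAdvance_spec (cov : PySem.Set Int) (r : Int) :
    r ≤ pvWhileAdvance cov r ∧
    (∀ t, r ≤ t → t < pvWhileAdvance cov r → t ∈ cov) ∧
    pvWhileAdvance cov r ∉ cov :=
  pvAdvance_spec (cov.length + 1) cov r
    (Nat.lt_succ_of_le (List.length_filter_le _ _))

-- the invariant of one half of the sweep state: after absorbing indices [i, j), the set S
-- holds exactly the k with track[m] = mk k for some m in [i, j), and r is the first value
-- from base upward not in S
def pvInv (track : List (List Int)) (i j : Int) (mk : Int → List Int) (base : Int)
    (S : PySem.Set Int) (r : Int) : Prop :=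
  (∀ k, k ∈ S ↔ ∃ m, i ≤ m ∧ m < j ∧ pvRow track m = mk k) ∧
  base ≤ r ∧ (∀ k, base ≤ k → k < r → k ∈ S) ∧ r ∉ S

-- membership after Set.add of the qualifying coordinate
theorem pvInv_add (track : List (List Int)) (i j : Int) (mk : Int → List Int) (base : Int)
    (S : PySem.Set Int) (r : Int) (hinv : pvInv track i j mk base S r) (v : Int)
    (hv : ∀ k, pvRow track j = mk k ↔ k = v) (hij : i ≤ j) :
    pvInv track i (j + 1) mk base (PySem.Set.add S v) (pvWhileAdvance (PySem.Set.add S v) r) := by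
  obtain ⟨hmem, hbr, hpre, hrno⟩ := hinv
  have hadv := pvWhileAdvance_spec (PySem.Set.add S v) r
  refine ⟨fun k => ?_, by omega, fun k h1 h2 => ?_, hadv.2.2⟩
  · rw [PySem.Set.mem_add, hmem]
    constructor
    · rintro (⟨m, hm1, hm2, hm3⟩ | rfl)
      · exact ⟨m, hm1, by omega, hm3⟩
      · exact ⟨j, hij, by omega, (hv k).mpr rfl⟩
    · rintro ⟨m, hm1, hm2, hm3⟩
      by_cases hmj : m = j
      · right; subst hmj; exact (hv k).mp hm3
      · left; exact ⟨m, hm1, by omega, hm3⟩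
  · by_cases hk : k < r
    · rw [PySem.Set.mem_add]; left; exact hpre k h1 hk
    · exact hadv.2.1 k (by omega) h2

-- an absorb step with no qualifying coordinate leaves the invariant intact
theorem pvInv_skip (track : List (List Int)) (i j : Int) (mk : Int → List Int) (base : Int)
    (S : PySem.Set Int) (r : Int) (hinv : pvInv track i j mk base S r)
    (hno : ∀ k, pvRow track j ≠ mk k) :
    pvInv track i (j + 1) mk base S r := by
  obtain ⟨hmem, hbr, hpre, hrno⟩ := hinv
  refine ⟨fun k => ?_, hbr, hpre, hrno⟩
  rw [hmem]
  constructor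
  · rintro ⟨m, hm1, hm2, hm3⟩; exact ⟨m, hm1, by omega, hm3⟩
  · rintro ⟨m, hm1, hm2, hm3⟩
    by_cases hmj : m = j
    · subst hmj; exact absurd hm3 (hno k)
    · exact ⟨m, hm1, by omega, hm3⟩

-- absorb preserves both halves of the invariant, [i, j) → [i, j+1)
theorem pvAbsorb_inv (track : List (List Int)) (i j xi yi : Int)
    (st : (PySem.Set Int × Int) × (PySem.Set Int × Int)) (hij : i ≤ j)
    (hc : pvInv track i j (fun k => [xi, k]) yi st.1.1 st.1.2)
    (hr : pvInv track i j (fun k => [k, yi]) xi st.2.1 st.2.2) :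
    pvInv track i (j + 1) (fun k => [xi, k]) yi
        (pvAbsorb xi yi st (pvRow track j)).1.1 (pvAbsorb xi yi st (pvRow track j)).1.2 ∧
    pvInv track i (j + 1) (fun k => [k, yi]) xi
        (pvAbsorb xi yi st (pvRow track j)).2.1 (pvAbsorb xi yi st (pvRow track j)).2.2 := by
  unfold pvAbsorb
  by_cases hlen : (pvRow track j).length = 2
  · simp only [if_pos hlen]
    constructor
    · by_cases hx : pvCoord (pvRow track j) 0 = xi
      · simp only [if_pos hx]
        exact pvInv_add track i j _ yi st.1.1 st.1.2 hc (pvCoord (pvRow track j) 1)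
          (fun k => by rw [pvPair_eq_iff]; constructor
                       · rintro ⟨-, -, h⟩; omega
                       · rintro rfl; exact ⟨hlen, hx, rfl⟩) hij
      · simp only [if_neg hx]
        exact pvInv_skip track i j _ yi st.1.1 st.1.2 hc
          (fun k h => hx ((pvPair_eq_iff _ _ _).mp h).2.1)
    · by_cases hy : pvCoord (pvRow track j) 1 = yi
      · simp only [if_pos hy]
        exact pvInv_add track i j _ xi st.2.1 st.2.2 hr (pvCoord (pvRow track j) 0)
          (fun k => by rw [pvPair_eq_iff]; constructor
                       · rintro ⟨-, h, -⟩; omega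
                       · rintro rfl; exact ⟨hlen, rfl, hy⟩) hij
      · simp only [if_neg hy]
        exact pvInv_skip track i j _ xi st.2.1 st.2.2 hr
          (fun k h => hy ((pvPair_eq_iff _ _ _).mp h).2.2)
  · simp only [if_neg hlen]
    exact ⟨pvInv_skip track i j _ yi st.1.1 st.1.2 hc
      (fun k h => hlen (by rw [h]; rfl)),
      pvInv_skip track i j _ xi st.2.1 st.2.2 hr
      (fun k h => hlen (by rw [h]; rfl))⟩

-- A's flag loop computes 1 iff some index in [i, j) holds the probed point
theorem pvMScanA_closed (track : List (List Int)) (i j : Int) (p : List Int) :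
    pvMScanA track i j p =
      if (PySem.List.pyRange i j 1).any (fun m => decide (pvRow track m = p)) then 1 else 0 := by
  unfold pvMScanA
  generalize PySem.List.pyRange i j 1 = l
  suffices h : ∀ (a : Int), l.foldl (fun f m => if pvRow track m = p then 1 else f) a =
      if l.any (fun m => decide (pvRow track m = p)) then 1 else a by
    simpa using h 0
  induction l with
  | nil => intro a; simp
  | cons x xs ih =>
      intro a
      by_cases hx : pvRow track x = p <;> simp [hx, ih, ite_self]

-- A's k-loop (with break) returns 1 iff every sample point is found in [i, j)
theorem pvKLoopA_eq_one_iff (track : List (List Int)) (i j : Int) (pt : Int → List Int)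
    (ks : List Int) :
    pvKLoopA track i j pt ks = 1 ↔
      ∀ k ∈ ks, ∃ m, i ≤ m ∧ m < j ∧ pvRow track m = pt k := by
  induction ks with
  | nil => simp [pvKLoopA]
  | cons k ks ih =>
      simp only [pvKLoopA, pvMScanA_closed]
      by_cases h : (PySem.List.pyRange i j 1).any (fun m => decide (pvRow track m = pt k)) = true
      · rw [if_neg (by simp [h]), ih]
        simp only [List.any_eq_true, PySem.List.mem_pyRange_one, decide_eq_true_eq] at h
        obtain ⟨m, ⟨hm1, hm2⟩, hm3⟩ := h
        constructor
        · intro hall k' hk'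
          rcases List.mem_cons.mp hk' with rfl | hk'
          · exact ⟨m, hm1, hm2, hm3⟩
          · exact hall k' hk'
        · intro hall k' hk'
          exact hall k' (List.mem_cons_of_mem _ hk')
      · rw [if_pos (by simp [h])]
        constructor
        · intro h01; exact absurd h01 (by norm_num)
        · intro hall
          obtain ⟨m, hm1, hm2, hm3⟩ := hall k (by simp)
          exact absurd (by simp only [List.any_eq_true, PySem.List.mem_pyRange_one]
                           exact ⟨m, ⟨hm1, hm2⟩, by simp [hm3]⟩) h

-- from the invariant: "every sample in [base, hi) is covered" collapses to "hi ≤ r"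
theorem pvReach_iff (track : List (List Int)) (i j : Int) (mk : Int → List Int) (base : Int)
    (S : PySem.Set Int) (r : Int) (hinv : pvInv track i j mk base S r) (hi : Int) :
    (∀ k ∈ PySem.List.pyRange base hi 1, ∃ m, i ≤ m ∧ m < j ∧ pvRow track m = mk k) ↔
      hi ≤ r := by
  obtain ⟨hmem, hbr, hpre, hrno⟩ := hinv
  constructor
  · intro hall
    by_contra hlt
    exact hrno ((hmem r).mpr
      (hall r (by rw [PySem.List.mem_pyRange_one]; omega)))
  · intro hle k hk
    rw [PySem.List.mem_pyRange_one] at hk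
    exact (hmem k).mp (hpre k hk.1 (by omega))

-- per-pair: B's pointer test returns exactly A's appended-or-not accumulator
theorem pvStep_acc_eq (track : List (List Int)) (i j : Int)
    (st : (PySem.Set Int × Int) × (PySem.Set Int × Int)) (acc : List (List (List Int)))
    (hc : pvInv track i j (fun k => [pvCoord (pvRow track i) 0, k])
        (pvCoord (pvRow track i) 1) st.1.1 st.1.2)
    (hr : pvInv track i j (fun k => [k, pvCoord (pvRow track i) 1])
        (pvCoord (pvRow track i) 0) st.2.1 st.2.2) :
    (pvStepB track i (pvCoord (pvRow track i) 0) (pvCoord (pvRow track i) 1) (st, acc) j).2 =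
      pvBodyA track i acc j := by
  unfold pvStepB pvBodyA
  dsimp only
  set xi := pvCoord (pvRow track i) 0
  set yi := pvCoord (pvRow track i) 1
  set xj := pvCoord (pvRow track j) 0
  set yj := pvCoord (pvRow track j) 1
  by_cases hd : |xi - xj| + |yi - yj| ≤ 20 ∧ |xi - xj| + |yi - yj| > 1
  · rw [if_pos ⟨by omega, by omega⟩, if_pos hd]
    by_cases hx : xi = xj
    · rw [if_pos hx, if_pos hx]
      have := (pvKLoopA_eq_one_iff track i j (fun k => [xi, k])
          (PySem.List.pyRange yi yj 1)).trans (pvReach_iff track i j _ yi st.1.1 st.1.2 hc yj)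
      by_cases hs : yj ≤ st.1.2
      · rw [if_pos (by simpa using hs), if_neg (by simpa using this.mpr hs)]
      · rw [if_neg (by simpa using hs), if_pos (by intro h; exact hs (this.mp h))]
    · rw [if_neg hx, if_neg hx]
      by_cases hy : yi = yj
      · rw [if_pos hy, if_pos hy]
        have := (pvKLoopA_eq_one_iff track i j (fun k => [k, yi])
            (PySem.List.pyRange xi xj 1)).trans (pvReach_iff track i j _ xi st.2.1 st.2.2 hr xj)
        by_cases hs : xj ≤ st.2.2
        · rw [if_pos (by simpa using hs), if_neg (by simpa using this.mpr hs)]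
        · rw [if_neg (by simpa using hs), if_pos (by intro h; exact hs (this.mp h))]
      · rw [if_neg hy, if_neg hy]
        simp
  · rw [if_neg (by omega), if_neg hd]

-- the whole inner sweep: from an invariant at j, B's stateful fold produces A's fold
theorem pvInner_eq (track : List (List Int)) (i : Int) :
    ∀ (cnt : Nat) (j : Int), ((track.length : Int) - j).toNat ≤ cnt → i ≤ j →
      ∀ (st : (PySem.Set Int × Int) × (PySem.Set Int × Int)) (acc : List (List (List Int))),
      pvInv track i j (fun k => [pvCoord (pvRow track i) 0, k])
          (pvCoord (pvRow track i) 1) st.1.1 st.1.2 →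
      pvInv track i j (fun k => [k, pvCoord (pvRow track i) 1])
          (pvCoord (pvRow track i) 0) st.2.1 st.2.2 →
      ((PySem.List.pyRange j (track.length : Int) 1).foldl
          (pvStepB track i (pvCoord (pvRow track i) 0) (pvCoord (pvRow track i) 1))
          (st, acc)).2 =
        (PySem.List.pyRange j (track.length : Int) 1).foldl (pvBodyA track i) acc := by
  intro cnt
  induction cnt with
  | zero =>
      intro j hcnt hij st acc hc hr
      rw [PySem.List.pyRange_one_eq_nil (by omega)]
      rfl
  | succ cnt ih =>
      intro j hcnt hij st acc hc hr
      by_cases hjn : j < (track.length : Int)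
      · rw [PySem.List.pyRange_one_cons hjn]
        simp only [List.foldl_cons]
        have hacc := pvStep_acc_eq track i j st acc hc hr
        have habs := pvAbsorb_inv track i j _ _ st hij hc hr
        have hfst : (pvStepB track i (pvCoord (pvRow track i) 0) (pvCoord (pvRow track i) 1)
            (st, acc) j).1 = pvAbsorb (pvCoord (pvRow track i) 0) (pvCoord (pvRow track i) 1)
            st (pvRow track j) := rfl
        rw [show (pvStepB track i (pvCoord (pvRow track i) 0) (pvCoord (pvRow track i) 1)
              (st, acc) j) =
            ((pvStepB track i (pvCoord (pvRow track i) 0) (pvCoord (pvRow track i) 1)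
              (st, acc) j).1,
             (pvStepB track i (pvCoord (pvRow track i) 0) (pvCoord (pvRow track i) 1)
              (st, acc) j).2) from rfl]
        rw [hacc, hfst]
        exact ih (j + 1) (by omega) (by omega) _ (pvBodyA track i acc j) habs.1 habs.2
      · rw [PySem.List.pyRange_one_eq_nil (by omega)]
        rfl

-- the empty state satisfies the invariant at j = i
theorem pvInv_empty (track : List (List Int)) (i : Int) (mk : Int → List Int) (base : Int) :
    pvInv track i i mk base PySem.Set.empty base := by
  refine ⟨fun k => ?_, le_refl base, fun k h1 h2 => by omega, by simp [PySem.Set.empty]⟩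
  simp only [PySem.Set.empty, List.not_mem_nil, false_iff]
  rintro ⟨m, h1, h2, -⟩
  omega

theorem find_all_shortcuts_eq (track : List (List Int)) :
    find_all_shortcuts track = find_all_shortcuts_alt track := by
  unfold find_all_shortcuts find_all_shortcuts_alt
  apply PySem.List.foldl_congr_mem
  intro acc i _
  dsimp only
  have h0 := pvAbsorb_inv track i i (pvCoord (pvRow track i) 0) (pvCoord (pvRow track i) 1)
    ((PySem.Set.empty, pvCoord (pvRow track i) 1), (PySem.Set.empty, pvCoord (pvRow track i) 0))
    (le_refl i)
    (pvInv_empty track i _ _) (pvInv_empty track i _ _)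
  exact (pvInner_eq track i ((track.length : Int) - (i + 1)).toNat (i + 1) (by omega)
    (by omega) _ acc h0.1 h0.2).symm

-- ===== VERDICT (by name: the statement is the Claim_ definition above) =====
theorem find_all_shortcuts_spec : Claim_equal_find_all_shortcuts := by
  intro track _ _
  unfold Spec_find_all_shortcuts
  exact find_all_shortcuts_eq track
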